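-- pv_equiv track=rewrite | github.com/odoo/o-spreadsheet | script.py | skip_template_literal
-- ===== SOURCE A (Python) =====
-- def skip_line_comment(src: str, pos: int) -> int:
--     """Advance past a // comment (up to but not including the newline)."""
--     while pos < len(src) and src[pos] != "\n":
--         pos += 1
--     return pos
--
-- def skip_block_comment(src: str, pos: int) -> int:
--     """Advance past a /* ... */ comment. pos is right after '/*'."""
--     while pos < len(src) - 1:
--         if src[pos] == "*" and src[pos + 1] == "/":
--             return pos + 2
--         pos += 1
--     return len(src)
--
-- def skip_string(src: str, pos: int, quote: str) -> int:
--     """Advance past a quoted string. pos is right after the opening quote."""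
--     while pos < len(src):
--         ch = src[pos]
--         if ch == "\\":
--             pos += 2  # skip escape sequence
--             continue
--         if ch == quote:
--             return pos + 1
--         pos += 1
--     return len(src)
--
-- def skip_template_literal(src: str, pos: int) -> int:
--     """Advance past a template literal `...`. pos is right after the opening backtick.
--     Handles nested ${...} expressions recursively."""
--     while pos < len(src):
--         ch = src[pos]
--         if ch == "\\":
--             pos += 2
--             continue
--         if ch == "`":
--             return pos + 1
--         if ch == "$" and pos + 1 < len(src) and src[pos + 1] == "{":
--             # Skip the ${...} expression
--             pos = skip_balanced_braces(src, pos + 2)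
--             continue
--         pos += 1
--     return len(src)
--
-- def skip_balanced_braces(src: str, pos: int) -> int:
--     """Advance past a balanced { } block. pos is right after the opening '{'.
--     Returns the position after the closing '}'."""
--     depth = 1
--     while pos < len(src) and depth > 0:
--         pos, depth = _advance_one_token(src, pos, depth, "{", "}")
--     return pos
--
-- def _advance_one_token(src: str, pos: int, depth: int, open_ch: str, close_ch: str):
--     """Advance one logical token, updating depth for open/close characters.
--     Returns (new_pos, new_depth)."""
--     ch = src[pos]
--     if ch == "/" and pos + 1 < len(src):
--         if src[pos + 1] == "/":
--             pos = skip_line_comment(src, pos + 2)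
--             return pos, depth
--         if src[pos + 1] == "*":
--             pos = skip_block_comment(src, pos + 2)
--             return pos, depth
--     if ch in ('"', "'"):
--         pos = skip_string(src, pos + 1, ch)
--         return pos, depth
--     if ch == "`":
--         pos = skip_template_literal(src, pos + 1)
--         return pos, depth
--     if ch == open_ch:
--         depth += 1
--     elif ch == close_ch:
--         depth -= 1
--     return pos + 1, depth
-- ===== SOURCE B (Python) =====
-- def skip_template_literal(src, pos):
--     """Advance past a template literal `...`; pos is right after the opening backtick.
--     Single iterative scanner: an explicit stack of contexts replaces the mutual recursion."""
--     n = len(src)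
--     stack = [('tmpl', 0)]  # frames: ('tmpl',_), ('brace',depth), ('line',_), ('block',_), ('str',quote)
--     while pos < n:
--         ch = src[pos]
--         kind, arg = stack[-1]
--         if kind == 'tmpl':
--             if ch == '\\':
--                 pos += 2
--             elif ch == '`':
--                 stack.pop()
--                 if not stack:
--                     return pos + 1
--                 pos += 1
--             elif ch == '$' and pos + 1 < n and src[pos + 1] == '{':
--                 stack.append(('brace', 1))
--                 pos += 2
--             else:
--                 pos += 1
--         elif kind == 'brace':
--             if ch == '/' and pos + 1 < n and src[pos + 1] == '/':
--                 stack.append(('line', 0))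
--                 pos += 2
--             elif ch == '/' and pos + 1 < n and src[pos + 1] == '*':
--                 stack.append(('block', 0))
--                 pos += 2
--             elif ch == '"' or ch == "'":
--                 stack.append(('str', ch))
--                 pos += 1
--             elif ch == '`':
--                 stack.append(('tmpl', 0))
--                 pos += 1
--             elif ch == '{':
--                 stack[-1] = ('brace', arg + 1)
--                 pos += 1
--             elif ch == '}':
--                 if arg == 1:
--                     stack.pop()
--                 else:
--                     stack[-1] = ('brace', arg - 1)
--                 pos += 1
--             else:
--                 pos += 1
--         elif kind == 'line':
--             if ch == '\n':
--                 stack.pop()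
--             else:
--                 pos += 1
--         elif kind == 'block':
--             if ch == '*' and pos + 1 < n and src[pos + 1] == '/':
--                 stack.pop()
--                 pos += 2
--             else:
--                 pos += 1
--         else:  # 'str'
--             if ch == '\\':
--                 pos += 2
--             elif ch == arg:
--                 stack.pop()
--                 pos += 1
--             else:
--                 pos += 1
--     return n
-- ===== Notes on version B (the rewrite author's own statement) =====
-- stated objective: alternative
-- what changed: The mutually recursive helper cluster (template/braces/token/string/comment skippers) is replaced by a single iterative scanner: one while loop over the source driven by an explicit stack of context frames (template, brace-with-depth, line-comment, block-comment, string-with-quote).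
import Mathlib
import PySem

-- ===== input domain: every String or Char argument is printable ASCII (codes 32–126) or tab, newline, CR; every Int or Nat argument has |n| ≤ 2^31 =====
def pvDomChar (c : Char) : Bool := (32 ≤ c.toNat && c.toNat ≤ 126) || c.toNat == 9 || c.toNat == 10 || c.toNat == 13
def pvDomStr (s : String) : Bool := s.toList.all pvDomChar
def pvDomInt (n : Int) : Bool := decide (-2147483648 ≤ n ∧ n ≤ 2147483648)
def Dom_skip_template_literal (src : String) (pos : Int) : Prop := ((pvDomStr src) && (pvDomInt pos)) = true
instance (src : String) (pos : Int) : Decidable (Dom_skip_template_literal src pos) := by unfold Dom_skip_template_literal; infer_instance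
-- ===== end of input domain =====

-- B replaces A's mutual recursion by one iterative scanner over an explicit stack of
-- context frames (alternative decomposition, same cost). Return values only; no mutation.

-- termination measure helper, cited by the ports' decreasing_by (proved once to keep the ports' proof terms small)
theorem pv_step (n p q : Int) (h1 : p < n) (h2 : p < q) : (n - q).toNat < (n - p).toNat := by
  omega

-- ===== PORT A =====
-- skip_line_comment: while pos < len and src[pos] != '\n': pos += 1; return pos
def lineA (s : List Char) (pos : Int) : Int :=
  if _h : pos < (s.length : Int) then
    match PySem.List.pyGet? s pos with
    | some c => if c = '\n' then pos else lineA s (pos + 1)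
    | none => pos  -- Python raises IndexError here; unreachable under Pre_
  else pos
termination_by ((s.length : Int) - pos).toNat
decreasing_by exact pv_step _ _ _ _h (by omega)

-- skip_block_comment
def blockA (s : List Char) (pos : Int) : Int :=
  if _h : pos < (s.length : Int) - 1 then
    if PySem.List.pyGet? s pos = some '*' ∧ PySem.List.pyGet? s (pos + 1) = some '/' then pos + 2
    else blockA s (pos + 1)
  else (s.length : Int)
termination_by ((s.length : Int) - pos).toNat
decreasing_by exact pv_step _ _ _ (by omega) (by omega)

-- skip_string
def strA (s : List Char) (pos : Int) (q : Char) : Int :=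
  if _h : pos < (s.length : Int) then
    match PySem.List.pyGet? s pos with
    | some c =>
      if c = '\\' then strA s (pos + 2) q
      else if c = q then pos + 1
      else strA s (pos + 1) q
    | none => pos  -- Python raises IndexError; unreachable under Pre_
  else (s.length : Int)
termination_by ((s.length : Int) - pos).toNat
decreasing_by all_goals exact pv_step _ _ _ _h (by omega)

-- skip_template_literal / skip_balanced_braces / _advance_one_token: mutual recursion,
-- made total with a fuel parameter (one unit per loop iteration / helper call; the fuel
-- chosen at the top level is provably sufficient, see the lemmas below).
mutual
def tmplA (s : List Char) (f : Nat) (pos : Int) : Int :=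
  match f with
  | 0 => (s.length : Int)  -- fuel exhausted: unreachable at the fuel used below
  | f + 1 =>
    if pos < (s.length : Int) then
      match PySem.List.pyGet? s pos with
      | some c =>
        if c = '\\' then tmplA s f (pos + 2)
        else if c = '`' then pos + 1
        else if c = '$' ∧ pos + 1 < (s.length : Int) ∧ PySem.List.pyGet? s (pos + 1) = some '{' then
          tmplA s f (bracesA s f (pos + 2) 1)
        else tmplA s f (pos + 1)
      | none => (s.length : Int)  -- Python raises IndexError; unreachable under Pre_
    else (s.length : Int)
termination_by (f, 0)
decreasing_by all_goals first
  | (apply Prod.Lex.left; exact Nat.lt_succ_self _)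
  | (apply Prod.Lex.right; omega)

def bracesA (s : List Char) (f : Nat) (pos depth : Int) : Int :=
  match f with
  | 0 => (s.length : Int)  -- fuel exhausted: unreachable
  | f + 1 =>
    if pos < (s.length : Int) ∧ 0 < depth then
      bracesA s f (advA s f pos depth).1 (advA s f pos depth).2
    else pos
termination_by (f, 1)
decreasing_by all_goals first
  | (apply Prod.Lex.left; exact Nat.lt_succ_self _)
  | (apply Prod.Lex.right; omega)

def advA (s : List Char) (f : Nat) (pos depth : Int) : Int × Int :=
  match PySem.List.pyGet? s pos with
  | some c =>
    if c = '/' ∧ pos + 1 < (s.length : Int) ∧ PySem.List.pyGet? s (pos + 1) = some '/' then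
      (lineA s (pos + 2), depth)
    else if c = '/' ∧ pos + 1 < (s.length : Int) ∧ PySem.List.pyGet? s (pos + 1) = some '*' then
      (blockA s (pos + 2), depth)
    else if c = '"' ∨ c = '\'' then (strA s (pos + 1) c, depth)
    else if c = '`' then (tmplA s f (pos + 1), depth)
    else if c = '{' then (pos + 1, depth + 1)
    else if c = '}' then (pos + 1, depth - 1)
    else (pos + 1, depth)
  | none => (pos, depth)  -- Python raises IndexError; unreachable under Pre_
termination_by (f, 2)
decreasing_by all_goals first
  | (apply Prod.Lex.left; exact Nat.lt_succ_self _)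
  | (apply Prod.Lex.right; omega)
end

def skip_template_literal (src : String) (pos : Int) : Int :=
  tmplA src.toList (2 * src.toList.length + 2) pos

-- ===== PORT B =====
inductive ScanFrame where
  | tmpl : ScanFrame
  | brace : Int → ScanFrame
  | line : ScanFrame
  | block : ScanFrame
  | str : Char → ScanFrame
deriving DecidableEq

-- the single scan loop of Source B: dispatch on the top-of-stack context frame
def runB (s : List Char) (pos : Int) (stack : List ScanFrame) : Int :=
  if _h : pos < (s.length : Int) then
    match PySem.List.pyGet? s pos with
    | none => pos  -- Python raises IndexError; unreachable under Pre_
    | some ch =>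
      match stack with
      | [] => pos  -- unreachable: the stack is never emptied without returning
      | ScanFrame.tmpl :: st =>
        if ch = '\\' then runB s (pos + 2) (ScanFrame.tmpl :: st)
        else if ch = '`' then (if st = [] then pos + 1 else runB s (pos + 1) st)
        else if ch = '$' ∧ pos + 1 < (s.length : Int) ∧ PySem.List.pyGet? s (pos + 1) = some '{' then
          runB s (pos + 2) (ScanFrame.brace 1 :: ScanFrame.tmpl :: st)
        else runB s (pos + 1) (ScanFrame.tmpl :: st)
      | ScanFrame.brace d :: st =>
        if ch = '/' ∧ pos + 1 < (s.length : Int) ∧ PySem.List.pyGet? s (pos + 1) = some '/' then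
          runB s (pos + 2) (ScanFrame.line :: ScanFrame.brace d :: st)
        else if ch = '/' ∧ pos + 1 < (s.length : Int) ∧ PySem.List.pyGet? s (pos + 1) = some '*' then
          runB s (pos + 2) (ScanFrame.block :: ScanFrame.brace d :: st)
        else if ch = '"' ∨ ch = '\'' then runB s (pos + 1) (ScanFrame.str ch :: ScanFrame.brace d :: st)
        else if ch = '`' then runB s (pos + 1) (ScanFrame.tmpl :: ScanFrame.brace d :: st)
        else if ch = '{' then runB s (pos + 1) (ScanFrame.brace (d + 1) :: st)
        else if ch = '}' then
          (if d = 1 then runB s (pos + 1) st else runB s (pos + 1) (ScanFrame.brace (d - 1) :: st))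
        else runB s (pos + 1) (ScanFrame.brace d :: st)
      | ScanFrame.line :: st =>
        if ch = '\n' then runB s pos st else runB s (pos + 1) (ScanFrame.line :: st)
      | ScanFrame.block :: st =>
        if ch = '*' ∧ pos + 1 < (s.length : Int) ∧ PySem.List.pyGet? s (pos + 1) = some '/' then
          runB s (pos + 2) st
        else runB s (pos + 1) (ScanFrame.block :: st)
      | ScanFrame.str q :: st =>
        if ch = '\\' then runB s (pos + 2) (ScanFrame.str q :: st)
        else if ch = q then runB s (pos + 1) st
        else runB s (pos + 1) (ScanFrame.str q :: st)
  else (s.length : Int)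
termination_by (((s.length : Int) - pos).toNat, stack.length)
decreasing_by all_goals first
  | (apply Prod.Lex.left; exact pv_step _ _ _ _h (by omega))
  | (apply Prod.Lex.right; exact Nat.lt_succ_self _)

def skip_template_literal_alt (src : String) (pos : Int) : Int :=
  runB src.toList pos [ScanFrame.tmpl]

-- ===== PRECONDITION & SPEC =====
-- Pre_ excludes exactly pos < -len(src), where Python's src[pos] raises IndexError (in both A and B).
def Pre_skip_template_literal (src : String) (pos : Int) : Prop :=
  -(PySem.Str.len src) ≤ pos
instance (src : String) (pos : Int) : Decidable (Pre_skip_template_literal src pos) := by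
  unfold Pre_skip_template_literal; infer_instance

def pvWitness_skip_template_literal : String × Int := ("a`", 0)

def Spec_skip_template_literal (src : String) (pos : Int) (out : Int) : Prop := out = skip_template_literal_alt src pos
instance (src : String) (pos : Int) (out : Int) : Decidable (Spec_skip_template_literal src pos out) := by unfold Spec_skip_template_literal; infer_instance

-- ===== CLAIM (what is proved, stated in full; the proofs are below) =====
def Claim_equal_skip_template_literal : Prop := ∀ (src : String) (pos : Int), Dom_skip_template_literal src pos → Pre_skip_template_literal src pos → Spec_skip_template_literal src pos (skip_template_literal src pos)

-- ===== LEMMAS AND PROOFS =====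

theorem lineA_bounds (s : List Char) (pos : Int) :
    pos ≤ lineA s pos ∧ (pos ≤ (s.length : Int) → lineA s pos ≤ (s.length : Int)) := by
  rw [lineA]
  split
  · cases hc : PySem.List.pyGet? s pos with
    | none => simp
    | some c =>
      simp only
      split
      · omega
      · have ih := lineA_bounds s (pos+1); omega
  · omega
termination_by ((s.length : Int) - pos).toNat
decreasing_by omega

theorem blockA_bounds (s : List Char) (pos : Int) :
    min pos (s.length : Int) ≤ blockA s pos ∧ blockA s pos ≤ (s.length : Int) := by
  rw [blockA]
  split
  · split
    · omega
    · have ih := blockA_bounds s (pos+1); omega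
  · omega
termination_by ((s.length : Int) - pos).toNat
decreasing_by omega

theorem strA_bounds (s : List Char) (pos : Int) (q : Char) :
    min pos (s.length : Int) ≤ strA s pos q ∧ strA s pos q ≤ (s.length : Int) := by
  rw [strA]
  split
  · cases hc : PySem.List.pyGet? s pos with
    | none => dsimp only; omega
    | some c =>
      simp only
      split
      · have ih := strA_bounds s (pos+2) q; omega
      · split
        · omega
        · have ih := strA_bounds s (pos+1) q; omega
  · omega
termination_by ((s.length : Int) - pos).toNat
decreasing_by all_goals omega

theorem tmplA_bracesA_bounds (s : List Char) (f : Nat) :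
    (∀ pos : Int, min pos (s.length : Int) ≤ tmplA s f pos ∧ tmplA s f pos ≤ (s.length : Int)) ∧
    (∀ pos depth : Int, min pos (s.length : Int) ≤ bracesA s f pos depth ∧
      (pos ≤ (s.length : Int) → bracesA s f pos depth ≤ (s.length : Int))) := by
  induction f with
  | zero =>
    constructor
    · intro pos; rw [tmplA]; omega
    · intro pos depth; rw [bracesA]; omega
  | succ f ih =>
    have advb : ∀ pos depth : Int, pos < (s.length : Int) →
        pos ≤ (advA s f pos depth).1 ∧ (advA s f pos depth).1 ≤ (s.length : Int) := by
      intro pos depth hp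
      rw [advA]
      cases hc : PySem.List.pyGet? s pos with
      | none => dsimp only; omega
      | some c =>
        simp only
        split
        · have := lineA_bounds s (pos+2); simp; omega
        · split
          · have := blockA_bounds s (pos+2); simp; omega
          · split
            · have := strA_bounds s (pos+1) c; simp; omega
            · split
              · have := ih.1 (pos+1); simp; omega
              · split
                · simp; omega
                · split
                  · simp; omega
                  · simp; omega
    constructor
    · intro pos
      rw [tmplA]
      split
      · cases hc : PySem.List.pyGet? s pos with
        | none => dsimp only; omega
        | some c =>
          simp only
          split
          · have := ih.1 (pos+2); omega
          · split
            · omega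
            · split
              · rename_i hcond
                have hb := ih.2 (pos+2) 1
                have ht := ih.1 (bracesA s f (pos+2) 1)
                omega
              · have := ih.1 (pos+1); omega
      · omega
    · intro pos depth
      rw [bracesA]
      split
      · rename_i hpd
        have ha := advb pos depth hpd.1
        have hb := ih.2 (advA s f pos depth).1 (advA s f pos depth).2
        omega
      · omega

theorem pyGet?_isSome_of (s : List Char) (pos : Int) (h1 : -(s.length : Int) ≤ pos)
    (h2 : pos < (s.length : Int)) : ∃ c, PySem.List.pyGet? s pos = some c := by
  cases hc : PySem.List.pyGet? s pos with
  | some c => exact ⟨c, rfl⟩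
  | none =>
    exact absurd ((PySem.List.pyGet?_eq_none_iff s pos).mp hc)
      (by unfold PySem.Raise.InRange; simp; omega)

theorem runB_nil (s : List Char) (p : Int) (hp : p ≤ (s.length : Int)) : runB s p [] = p := by
  rw [runB]
  split
  · cases hc : PySem.List.pyGet? s p <;> rfl
  · omega

theorem runB_line (s : List Char) (p : Int) (st : List ScanFrame) (h1 : -(s.length : Int) ≤ p) :
    runB s p (ScanFrame.line :: st) = runB s (lineA s p) st := by
  by_cases h : p < (s.length : Int)
  · obtain ⟨c, hc⟩ := pyGet?_isSome_of s p h1 h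
    rw [runB, lineA, dif_pos h, dif_pos h, hc]
    dsimp only
    by_cases hnl : c = '\n'
    · rw [if_pos hnl, if_pos hnl]
    · rw [if_neg hnl, if_neg hnl]
      exact runB_line s (p+1) st (by omega)
  · rw [runB, dif_neg h, lineA, dif_neg h, runB, dif_neg h]
termination_by ((s.length : Int) - p).toNat
decreasing_by omega

theorem runB_block (s : List Char) (p : Int) (st : List ScanFrame) (h1 : -(s.length : Int) ≤ p) :
    runB s p (ScanFrame.block :: st) = runB s (blockA s p) st := by
  by_cases h : p < (s.length : Int)
  · obtain ⟨c, hc⟩ := pyGet?_isSome_of s p h1 h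
    rw [runB, dif_pos h, hc]
    dsimp only
    by_cases hcond : c = '*' ∧ p + 1 < (s.length : Int) ∧ PySem.List.pyGet? s (p + 1) = some '/'
    · rw [if_pos hcond, blockA, dif_pos (by omega), if_pos ⟨by rw [hc, hcond.1], hcond.2.2⟩]
    · rw [if_neg hcond]
      by_cases hlt : p < (s.length : Int) - 1
      · rw [blockA, dif_pos hlt, if_neg (by
          rintro ⟨ha, hb⟩
          rw [hc] at ha
          exact hcond ⟨by injection ha, by omega, hb⟩)]
        exact runB_block s (p+1) st (by omega)
      · have e1 : blockA s p = (s.length : Int) := by rw [blockA, dif_neg hlt]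
        have e2 : blockA s (p+1) = (s.length : Int) := by rw [blockA, dif_neg (by omega)]
        rw [e1, runB_block s (p+1) st (by omega), e2]
  · have e1 : blockA s p = (s.length : Int) := by rw [blockA, dif_neg (by omega)]
    rw [runB, dif_neg h, e1, runB, dif_neg (by omega)]
termination_by ((s.length : Int) - p).toNat
decreasing_by all_goals omega

theorem runB_str (s : List Char) (p : Int) (st : List ScanFrame) (q : Char) (h1 : -(s.length : Int) ≤ p) :
    runB s p (ScanFrame.str q :: st) = runB s (strA s p q) st := by
  by_cases h : p < (s.length : Int)
  · obtain ⟨c, hc⟩ := pyGet?_isSome_of s p h1 h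
    rw [runB, strA, dif_pos h, dif_pos h, hc]
    dsimp only
    by_cases hb : c = '\\'
    · rw [if_pos hb, if_pos hb]
      exact runB_str s (p+2) st q (by omega)
    · rw [if_neg hb, if_neg hb]
      by_cases hq : c = q
      · rw [if_pos hq, if_pos hq]
      · rw [if_neg hq, if_neg hq]
        exact runB_str s (p+1) st q (by omega)
  · rw [runB, dif_neg h, strA, dif_neg h, runB, dif_neg (by omega)]
termination_by ((s.length : Int) - p).toNat
decreasing_by all_goals omega

theorem runB_sim (s : List Char) (f : Nat) :
    ∀ p : Int, -(s.length : Int) ≤ p → (s.length : Int) - p < (f : Int) →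
      (∀ st, runB s p (ScanFrame.tmpl :: st) = runB s (tmplA s f p) st) ∧
      (∀ st (d : Int), 1 ≤ d → runB s p (ScanFrame.brace d :: st) = runB s (bracesA s f p d) st) := by
  induction f with
  | zero =>
    intro p h1 h2
    have hnp : ¬ p < (s.length : Int) := by omega
    have et : tmplA s 0 p = (s.length : Int) := by rw [tmplA]
    have eb : ∀ d, bracesA s 0 p d = (s.length : Int) := fun d => by rw [bracesA]
    have hrl : ∀ st, runB s ((s.length : Int)) st = (s.length : Int) := fun st => by
      rw [runB, dif_neg (by omega)]
    constructor
    · intro st; rw [runB, dif_neg hnp, et, hrl st]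
    · intro st d _; rw [runB, dif_neg hnp, eb d, hrl st]
  | succ f ih =>
    intro p h1 h2
    have hB := tmplA_bracesA_bounds s f
    by_cases h : p < (s.length : Int)
    · obtain ⟨c, hc⟩ := pyGet?_isSome_of s p h1 h
      constructor
      · intro st
        rw [runB, dif_pos h, hc]
        dsimp only
        rw [tmplA]
        rw [if_pos h, hc]
        dsimp only
        by_cases hb : c = '\\'
        · rw [if_pos hb, if_pos hb]
          exact (ih (p+2) (by omega) (by omega)).1 st
        · rw [if_neg hb, if_neg hb]
          by_cases hbt : c = '`'
          · rw [if_pos hbt, if_pos hbt]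
            cases st with
            | nil => rw [if_pos rfl, runB_nil s (p+1) (by omega)]
            | cons a l => rw [if_neg (by simp)]
          · rw [if_neg hbt, if_neg hbt]
            by_cases hdl : c = '$' ∧ p + 1 < (s.length : Int) ∧ PySem.List.pyGet? s (p + 1) = some '{'
            · rw [if_pos hdl, if_pos hdl]
              have hbr := hB.2 (p+2) 1
              have hr1 : min (p+2) (s.length : Int) = p + 2 := by omega
              rw [(ih (p+2) (by omega) (by omega)).2 (ScanFrame.tmpl :: st) 1 (by omega)]
              exact (ih (bracesA s f (p+2) 1) (by omega) (by omega)).1 st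
            · rw [if_neg hdl, if_neg hdl]
              exact (ih (p+1) (by omega) (by omega)).1 st
      · intro st d hd
        rw [runB, dif_pos h, hc]
        dsimp only
        rw [bracesA]
        rw [if_pos (show p < (s.length : Int) ∧ 0 < d from ⟨h, by omega⟩), advA, hc]
        dsimp only
        by_cases h1c : c = '/' ∧ p + 1 < (s.length : Int) ∧ PySem.List.pyGet? s (p + 1) = some '/'
        · rw [if_pos h1c, if_pos h1c]
          dsimp only
          have hlb := lineA_bounds s (p+2)
          rw [runB_line s (p+2) (ScanFrame.brace d :: st) (by omega)]
          exact (ih (lineA s (p+2)) (by omega) (by omega)).2 st d hd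
        · rw [if_neg h1c, if_neg h1c]
          by_cases h2c : c = '/' ∧ p + 1 < (s.length : Int) ∧ PySem.List.pyGet? s (p + 1) = some '*'
          · rw [if_pos h2c, if_pos h2c]
            dsimp only
            have hbb := blockA_bounds s (p+2)
            have : min (p+2) (s.length : Int) = p + 2 := by omega
            rw [runB_block s (p+2) (ScanFrame.brace d :: st) (by omega)]
            exact (ih (blockA s (p+2)) (by omega) (by omega)).2 st d hd
          · rw [if_neg h2c, if_neg h2c]
            by_cases h3c : c = '"' ∨ c = '\''
            · rw [if_pos h3c, if_pos h3c]
              dsimp only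
              have hsb := strA_bounds s (p+1) c
              have : min (p+1) (s.length : Int) = p + 1 := by omega
              rw [runB_str s (p+1) (ScanFrame.brace d :: st) c (by omega)]
              exact (ih (strA s (p+1) c) (by omega) (by omega)).2 st d hd
            · rw [if_neg h3c, if_neg h3c]
              by_cases h4c : c = '`'
              · rw [if_pos h4c, if_pos h4c]
                dsimp only
                have htb := hB.1 (p+1)
                have : min (p+1) (s.length : Int) = p + 1 := by omega
                rw [(ih (p+1) (by omega) (by omega)).1 (ScanFrame.brace d :: st)]
                exact (ih (tmplA s f (p+1)) (by omega) (by omega)).2 st d hd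
              · rw [if_neg h4c, if_neg h4c]
                by_cases h5c : c = '{'
                · rw [if_pos h5c, if_pos h5c]
                  dsimp only
                  exact (ih (p+1) (by omega) (by omega)).2 st (d+1) (by omega)
                · rw [if_neg h5c, if_neg h5c]
                  by_cases h6c : c = '}'
                  · rw [if_pos h6c, if_pos h6c]
                    dsimp only
                    by_cases hd1 : d = 1
                    · rw [if_pos hd1]
                      obtain ⟨f', rfl⟩ : ∃ f', f = f' + 1 := ⟨f - 1, by omega⟩
                      have eb : bracesA s (f'+1) (p+1) (d-1) = p + 1 := by
                        rw [bracesA]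
                        rw [if_neg (by omega)]
                      rw [eb]
                    · rw [if_neg hd1]
                      exact (ih (p+1) (by omega) (by omega)).2 st (d-1) (by omega)
                  · rw [if_neg h6c, if_neg h6c]
                    dsimp only
                    exact (ih (p+1) (by omega) (by omega)).2 st d hd
    · have et : tmplA s (f+1) p = (s.length : Int) := by
        rw [tmplA]; rw [if_neg h]
      have eb : ∀ d, bracesA s (f+1) p d = p := fun d => by
        rw [bracesA]; rw [if_neg (by omega)]
      have hrl : ∀ st, runB s ((s.length : Int)) st = (s.length : Int) := fun st => by
        rw [runB, dif_neg (by omega)]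
      constructor
      · intro st; rw [runB, dif_neg h, et, hrl st]
      · intro st d _; rw [runB, dif_neg h, eb d, runB, dif_neg h]

-- ===== VERDICT (by name: the statement is the Claim_ definition above) =====
theorem skip_template_literal_spec : Claim_equal_skip_template_literal := by
  intro src pos _hdom hpre
  unfold Spec_skip_template_literal skip_template_literal skip_template_literal_alt
  have hpre' : -(src.toList.length : Int) ≤ pos := by
    unfold Pre_skip_template_literal at hpre
    simpa [PySem.Str.len_eq] using hpre
  have hsim := (runB_sim src.toList (2 * src.toList.length + 2) pos hpre'
    (by push_cast; omega)).1 []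
  have hle := ((tmplA_bracesA_bounds src.toList (2 * src.toList.length + 2)).1 pos).2
  rw [hsim, runB_nil src.toList _ hle]
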